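-- pv_equiv track=rewrite | github.com/yanchidezhang/leetcode | huawei/multiply.py | addTwoReverseNums
-- ===== SOURCE A (Python) =====
-- def addTwoReverseNums(n1, n2):
--     # zero-padding
--     pad = abs(len(n1) - len(n2))
--
--     if pad == 0:
--         pass
--     elif len(n1) > len(n2):
--         n2 += '0' * pad
--     else:
--         n1 += '0' * pad
--
--     carry = 0
--     rlt = ''
--     for i, j in zip(n1, n2):
--         temp_sum = int(i) + int(j) + carry
--
--         carry = 1 if temp_sum >= 10 else 0
--         rlt += str(temp_sum % 10)
--
--     if carry == 1:
--         rlt += '1'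
--
--     return rlt
-- ===== SOURCE B (Python) =====
-- def addTwoReverseNums(n1, n2):
--     # Convert each little-endian digit string to its integer value (Horner),
--     # add once with native integer addition, then re-expand the sum to exactly
--     # max(len(n1), len(n2)) little-endian digits plus a final '1' on overflow.
--     v = 0
--     for c in n1[::-1]:
--         v = 10 * v + int(c)
--     w = 0
--     for c in n2[::-1]:
--         w = 10 * w + int(c)
--     s = v + w
--     out = []
--     for _ in range(max(len(n1), len(n2))):
--         s, d = divmod(s, 10)
--         out.append(chr(48 + d))
--     if s:
--         out.append('1')
--     return ''.join(out)
-- ===== Notes on version B (the rewrite author's own statement) =====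
-- stated objective: alternative
-- what changed: Replaces the pad-then-zip ripple-carry digit loop with whole-number arithmetic: each string is read as one integer (Horner), the two integers are added once, and the sum is re-expanded to the required number of digits by repeated divmod.
import Mathlib
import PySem

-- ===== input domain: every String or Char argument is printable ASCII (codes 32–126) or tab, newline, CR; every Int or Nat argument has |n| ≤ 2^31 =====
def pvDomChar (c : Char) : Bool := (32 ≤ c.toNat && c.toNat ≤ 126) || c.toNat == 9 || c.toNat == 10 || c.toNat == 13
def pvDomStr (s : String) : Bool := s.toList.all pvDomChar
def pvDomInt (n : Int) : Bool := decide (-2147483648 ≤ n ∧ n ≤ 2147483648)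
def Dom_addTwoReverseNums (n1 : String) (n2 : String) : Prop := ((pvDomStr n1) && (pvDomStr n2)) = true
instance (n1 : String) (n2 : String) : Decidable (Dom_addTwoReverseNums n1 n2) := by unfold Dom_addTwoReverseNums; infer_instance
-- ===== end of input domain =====

-- B replaces A's pad-then-zip ripple-carry digit loop by whole-number arithmetic
-- (Horner conversion, one native addition, divmod re-expansion): an alternative
-- algorithm of the same cost.


-- ===== PORT A =====
def addTwoReverseNums (n1 : String) (n2 : String) : String :=
  let l1 := n1.toList
  let l2 := n2.toList
  -- pad = abs(len(n1) - len(n2)); then the if/elif/else zero-padding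
  let pad : Nat := ((l1.length : Int) - (l2.length : Int)).natAbs
  let p :=
    if pad = 0 then (l1, l2)
    else if l2.length < l1.length then (l1, l2 ++ List.replicate pad '0')
    else (l1 ++ List.replicate pad '0', l2)
  -- for i, j in zip(n1, n2): state = (carry, rlt)
  let st := (p.1.zip p.2).foldl
    (fun (st : Int × List Char) (ij : Char × Char) =>
      -- int(i) on the one-character string i → PySem.Int.ofChars? [i]; .getD 0 is
      -- never taken on Pre_ (digit chars), where ofChars? is some
      let tempSum := (PySem.Int.ofChars? [ij.1]).getD 0 + (PySem.Int.ofChars? [ij.2]).getD 0 + st.1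
      ((if 10 ≤ tempSum then 1 else 0),
       st.2 ++ PySem.Int.toChars (PySem.Int.mod tempSum 10)))
    (0, [])
  let rlt := if st.1 = 1 then st.2 ++ ['1'] else st.2
  String.ofList rlt

-- ===== PORT B =====
def addTwoReverseNums_alt (n1 : String) (n2 : String) : String :=
  -- n1[::-1] is List.reverse (PySem.Str.slice?_none_none_neg_one); int(c) on the
  -- one-character string c → PySem.Int.ofChars? [c]; .getD 0 never taken on Pre_ (digits)
  let v := n1.toList.reverse.foldl (fun a c => 10 * a + (PySem.Int.ofChars? [c]).getD 0) 0
  let w := n2.toList.reverse.foldl (fun a c => 10 * a + (PySem.Int.ofChars? [c]).getD 0) 0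
  -- for _ in range(max(len(n1), len(n2))): s, d = divmod(s, 10); out.append(chr(48 + d))
  -- divmod with literal divisor 10 ≠ 0 ported as floordiv/mod; chr(48+d) = Char.ofNat;
  -- out is a list of one-character strings, modelled as the chars ''.join concatenates
  let st := (List.range (max n1.toList.length n2.toList.length)).foldl
    (fun (st : Int × List Char) _ =>
      (PySem.Int.floordiv st.1 10,
       st.2 ++ [Char.ofNat ((48 + PySem.Int.mod st.1 10).toNat)]))
    (v + w, [])
  let out := if st.1 ≠ 0 then st.2 ++ ['1'] else st.2
  String.ofList out

-- ===== PRECONDITION & SPEC =====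
-- Pre_: both strings consist of decimal digit characters only — exactly the inputs
-- where A's int(i) per character does not raise ValueError.
def Pre_addTwoReverseNums (n1 : String) (n2 : String) : Prop :=
  (n1.toList.all (fun c => 48 ≤ c.toNat && c.toNat ≤ 57)
    && n2.toList.all (fun c => 48 ≤ c.toNat && c.toNat ≤ 57)) = true
instance (n1 : String) (n2 : String) : Decidable (Pre_addTwoReverseNums n1 n2) := by
  unfold Pre_addTwoReverseNums; infer_instance

def pvWitness_addTwoReverseNums : String × String := ("21", "936")

def Spec_addTwoReverseNums (n1 : String) (n2 : String) (out : String) : Prop := out = addTwoReverseNums_alt n1 n2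
instance (n1 : String) (n2 : String) (out : String) : Decidable (Spec_addTwoReverseNums n1 n2 out) := by unfold Spec_addTwoReverseNums; infer_instance

-- ===== CLAIM (what is proved, stated in full; the proofs are below) =====
def Claim_equal_addTwoReverseNums : Prop := ∀ (n1 : String) (n2 : String), Dom_addTwoReverseNums n1 n2 → Pre_addTwoReverseNums n1 n2 → Spec_addTwoReverseNums n1 n2 (addTwoReverseNums n1 n2)

-- ===== LEMMAS AND PROOFS =====

-- value of a little-endian digit string
def valLE : List Char → Nat
  | [] => 0
  | c :: cs => (c.toNat - 48) + 10 * valLE cs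

-- the m low decimal digits of n, little-endian
def digitsLE : Nat → Nat → List Char
  | 0, _ => []
  | m + 1, n => Char.ofNat (48 + n % 10) :: digitsLE m (n / 10)

theorem char_toNat_inj (c d : Char) (h : c.toNat = d.toNat) : c = d :=
  Char.ext (UInt32.toNat_inj.mp h)

theorem digit_char_cases (c : Char) (h1 : 48 ≤ c.toNat) (h2 : c.toNat ≤ 57) :
    c = '0' ∨ c = '1' ∨ c = '2' ∨ c = '3' ∨ c = '4' ∨ c = '5' ∨ c = '6' ∨ c = '7' ∨ c = '8' ∨ c = '9' := by
  have h : c.toNat = 48 ∨ c.toNat = 49 ∨ c.toNat = 50 ∨ c.toNat = 51 ∨ c.toNat = 52 ∨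
      c.toNat = 53 ∨ c.toNat = 54 ∨ c.toNat = 55 ∨ c.toNat = 56 ∨ c.toNat = 57 := by omega
  rcases h with h|h|h|h|h|h|h|h|h|h <;>
    [exact Or.inl (char_toNat_inj c '0' h);
     exact Or.inr (Or.inl (char_toNat_inj c '1' h));
     exact Or.inr (Or.inr (Or.inl (char_toNat_inj c '2' h)));
     exact Or.inr (Or.inr (Or.inr (Or.inl (char_toNat_inj c '3' h))));
     exact Or.inr (Or.inr (Or.inr (Or.inr (Or.inl (char_toNat_inj c '4' h)))));
     exact Or.inr (Or.inr (Or.inr (Or.inr (Or.inr (Or.inl (char_toNat_inj c '5' h))))));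
     exact Or.inr (Or.inr (Or.inr (Or.inr (Or.inr (Or.inr (Or.inl (char_toNat_inj c '6' h)))))));
     exact Or.inr (Or.inr (Or.inr (Or.inr (Or.inr (Or.inr (Or.inr (Or.inl (char_toNat_inj c '7' h))))))));
     exact Or.inr (Or.inr (Or.inr (Or.inr (Or.inr (Or.inr (Or.inr (Or.inr (Or.inl (char_toNat_inj c '8' h)))))))));
     exact Or.inr (Or.inr (Or.inr (Or.inr (Or.inr (Or.inr (Or.inr (Or.inr (Or.inr (char_toNat_inj c '9' h)))))))))]

-- int("<digit>") evaluates to the digit's value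
theorem ofChars_digit (c : Char) (h1 : 48 ≤ c.toNat) (h2 : c.toNat ≤ 57) :
    (PySem.Int.ofChars? [c]).getD 0 = ((c.toNat - 48 : Nat) : Int) := by
  rcases digit_char_cases c h1 h2 with h|h|h|h|h|h|h|h|h|h <;> subst h <;> decide

-- str(t) for one-digit t
theorem toChars_small (t : Int) (h0 : 0 ≤ t) (h1 : t < 10) :
    PySem.Int.toChars t = [Char.ofNat (48 + t.toNat)] := by
  have h : t = 0 ∨ t = 1 ∨ t = 2 ∨ t = 3 ∨ t = 4 ∨ t = 5 ∨ t = 6 ∨ t = 7 ∨ t = 8 ∨ t = 9 := by omega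
  rcases h with h|h|h|h|h|h|h|h|h|h <;> subst h <;> decide

theorem valLE_append_zeros (l : List Char) (k : Nat) :
    valLE (l ++ List.replicate k '0') = valLE l := by
  induction l with
  | nil =>
    simp only [List.nil_append, valLE]
    induction k with
    | zero => rfl
    | succ k ih => simpa [List.replicate_succ, valLE] using ih
  | cons c cs ih => simp [valLE, ih]

theorem digitsLE_succ_right (m n : Nat) :
    digitsLE (m + 1) n = digitsLE m n ++ [Char.ofNat (48 + n / 10 ^ m % 10)] := by
  induction m generalizing n with
  | zero => simp [digitsLE]
  | succ m ih =>
    show Char.ofNat (48 + n % 10) :: digitsLE (m + 1) (n / 10) = _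
    rw [ih]
    simp [digitsLE, Nat.div_div_eq_div_mul, pow_succ, mul_comm (10 ^ m) 10, Nat.div_div_eq_div_mul]

-- A's zip-loop computes the ripple-carry digits of the sum
theorem loopA (l1 : List Char) (l2 : List Char) (hlen : l1.length = l2.length)
    (h1 : ∀ c ∈ l1, 48 ≤ c.toNat ∧ c.toNat ≤ 57)
    (h2 : ∀ c ∈ l2, 48 ≤ c.toNat ∧ c.toNat ≤ 57)
    (c : Nat) (hc : c ≤ 1) (acc : List Char) :
    ((l1.zip l2).foldl
      (fun (st : Int × List Char) (ij : Char × Char) =>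
        ((if 10 ≤ (PySem.Int.ofChars? [ij.1]).getD 0 + (PySem.Int.ofChars? [ij.2]).getD 0 + st.1
            then 1 else 0),
         st.2 ++ PySem.Int.toChars
           (PySem.Int.mod ((PySem.Int.ofChars? [ij.1]).getD 0 + (PySem.Int.ofChars? [ij.2]).getD 0 + st.1) 10)))
      ((c : Int), acc))
    = ((if 10 ^ l1.length ≤ valLE l1 + valLE l2 + c then (1 : Int) else 0),
       acc ++ digitsLE l1.length (valLE l1 + valLE l2 + c)) := by
  induction l1 generalizing l2 c acc with
  | nil =>
    cases l2 with
    | cons b bs => simp at hlen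
    | nil =>
      simp only [List.zip_nil_right, List.foldl_nil, valLE]
      interval_cases c <;> simp [digitsLE]
  | cons a as ih =>
    cases l2 with
    | nil => simp at hlen
    | cons b bs =>
      have ha := h1 a (by simp)
      have hb := h2 b (by simp)
      have hlen' : as.length = bs.length := by simpa using hlen
      -- the per-position sum as a natural number
      set t : Nat := (a.toNat - 48) + (b.toNat - 48) + c with ht
      have hts : (PySem.Int.ofChars? [a]).getD 0 + (PySem.Int.ofChars? [b]).getD 0 + (c : Int)
          = (t : Int) := by
        rw [ofChars_digit a ha.1 ha.2, ofChars_digit b hb.1 hb.2]; omega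
      have ht19 : t ≤ 19 := by omega
      have hmod : PySem.Int.mod (t : Int) 10 = ((t % 10 : Nat) : Int) :=
        PySem.Int.mod_natCast t 10
      have hcar : (if (10 : Int) ≤ (t : Int) then (1 : Int) else 0)
          = ((if 10 ≤ t then 1 else 0 : Nat) : Int) := by
        split_ifs with h' h'' h'' <;> simp_all <;> omega
      simp only [List.zip_cons_cons, List.foldl_cons]
      rw [hts, hmod, hcar, toChars_small _ (by positivity) (by exact_mod_cast Nat.mod_lt t (by norm_num)),
        ih bs hlen' (fun x hx => h1 x (by simp [hx])) (fun x hx => h2 x (by simp [hx]))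
          _ (by split_ifs <;> omega) _]
      have hT : valLE as + valLE bs + (if 10 ≤ t then 1 else 0)
          = (valLE (a :: as) + valLE (b :: bs) + c) / 10 := by
        show _ = ((a.toNat - 48 + 10 * valLE as) + (b.toNat - 48 + 10 * valLE bs) + c) / 10
        have : (a.toNat - 48 + 10 * valLE as) + (b.toNat - 48 + 10 * valLE bs) + c
            = t + 10 * (valLE as + valLE bs) := by omega
        rw [this]
        rcases Nat.lt_or_ge t 10 with h' | h'
        · rw [if_neg (by omega)]; omega
        · rw [if_pos h']; omega
      have hTm : t % 10 = (valLE (a :: as) + valLE (b :: bs) + c) % 10 := by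
        show _ = ((a.toNat - 48 + 10 * valLE as) + (b.toNat - 48 + 10 * valLE bs) + c) % 10
        omega
      rw [Prod.mk.injEq]
      constructor
      · rw [hT]
        congr 1
        rw [eq_iff_iff]
        constructor
        · intro h'
          have h'' := (Nat.le_div_iff_mul_le (k := 10) (by norm_num)).mp h'
          simpa [List.length_cons, pow_succ] using h''
        · intro h'
          refine (Nat.le_div_iff_mul_le (k := 10) (by norm_num)).mpr ?_
          simpa [List.length_cons, pow_succ] using h'
      · show acc ++ [Char.ofNat (48 + t % 10)] ++ digitsLE as.length _ = acc ++ digitsLE (as.length + 1) _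
        rw [List.append_assoc]
        congr 1
        show [Char.ofNat (48 + t % 10)] ++ digitsLE as.length (valLE as + valLE bs + _) = _
        rw [hT, hTm]
        rfl

-- B's Horner loop computes the string's value
theorem hornerB (l : List Char) (h : ∀ c ∈ l, 48 ≤ c.toNat ∧ c.toNat ≤ 57) :
    l.reverse.foldl (fun a c => 10 * a + (PySem.Int.ofChars? [c]).getD 0) 0 = (valLE l : Int) := by
  induction l with
  | nil => rfl
  | cons c cs ih =>
    have hc := h c (by simp)
    rw [List.reverse_cons, List.foldl_append,
      ih (fun x hx => h x (by simp [hx]))]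
    show 10 * (valLE cs : Int) + (PySem.Int.ofChars? [c]).getD 0
        = ((c.toNat - 48) + 10 * valLE cs : Nat)
    rw [ofChars_digit c hc.1 hc.2]
    omega

-- B's divmod loop emits the m low digits, leaving s // 10^m
theorem loopB (m : Nat) (s : Nat) (acc : List Char) :
    ((List.range m).foldl
      (fun (st : Int × List Char) _ =>
        (PySem.Int.floordiv st.1 10,
         st.2 ++ [Char.ofNat ((48 + PySem.Int.mod st.1 10).toNat)]))
      ((s : Int), acc))
    = (((s / 10 ^ m : Nat) : Int), acc ++ digitsLE m s) := by
  induction m with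
  | zero => simp [digitsLE]
  | succ m ih =>
    rw [List.range_succ, List.foldl_append, ih]
    simp only [List.foldl_cons, List.foldl_nil]
    rw [show ((10 : Int)) = ((10 : Nat) : Int) from rfl,
      PySem.Int.floordiv_natCast, PySem.Int.mod_natCast]
    rw [Prod.mk.injEq]
    constructor
    · rw [Nat.div_div_eq_div_mul, pow_succ]
    · rw [digitsLE_succ_right, show ((48 : Int) + ((s / 10 ^ m % 10 : Nat) : Int)).toNat
          = 48 + s / 10 ^ m % 10 from by omega, List.append_assoc]

-- ===== VERDICT (by name: the statement is the Claim_ definition above) =====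
theorem addTwoReverseNums_spec : Claim_equal_addTwoReverseNums := by
  intro n1 n2 _ hpre
  rw [Pre_addTwoReverseNums, Bool.and_eq_true, List.all_eq_true, List.all_eq_true] at hpre
  obtain ⟨h1', h2'⟩ := hpre
  have h1 : ∀ c ∈ n1.toList, 48 ≤ c.toNat ∧ c.toNat ≤ 57 := by
    intro c hc; have := h1' c hc; simp only [Bool.and_eq_true, decide_eq_true_eq] at this; exact this
  have h2 : ∀ c ∈ n2.toList, 48 ≤ c.toNat ∧ c.toNat ≤ 57 := by
    intro c hc; have := h2' c hc; simp only [Bool.and_eq_true, decide_eq_true_eq] at this; exact this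
  show addTwoReverseNums n1 n2 = addTwoReverseNums_alt n1 n2
  unfold addTwoReverseNums addTwoReverseNums_alt
  set l1 := n1.toList with hl1
  set l2 := n2.toList with hl2
  set m := max l1.length l2.length with hm
  -- the padded pair has equal lengths m, all digits, and the original values
  have key : ∀ (L1 L2 : List Char),
      L1.length = m → L2.length = m →
      (∀ c ∈ L1, 48 ≤ c.toNat ∧ c.toNat ≤ 57) → (∀ c ∈ L2, 48 ≤ c.toNat ∧ c.toNat ≤ 57) →
      valLE L1 = valLE l1 → valLE L2 = valLE l2 →
      (let st := (L1.zip L2).foldl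
        (fun (st : Int × List Char) (ij : Char × Char) =>
          ((if 10 ≤ (PySem.Int.ofChars? [ij.1]).getD 0 + (PySem.Int.ofChars? [ij.2]).getD 0 + st.1
              then 1 else 0),
           st.2 ++ PySem.Int.toChars
             (PySem.Int.mod ((PySem.Int.ofChars? [ij.1]).getD 0 + (PySem.Int.ofChars? [ij.2]).getD 0 + st.1) 10)))
        (0, ([] : List Char))
       String.ofList (if st.1 = 1 then st.2 ++ ['1'] else st.2))
      = (let v := l1.reverse.foldl (fun a c => 10 * a + (PySem.Int.ofChars? [c]).getD 0) 0
         let w := l2.reverse.foldl (fun a c => 10 * a + (PySem.Int.ofChars? [c]).getD 0) 0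
         let st := (List.range m).foldl
           (fun (st : Int × List Char) _ =>
             (PySem.Int.floordiv st.1 10,
              st.2 ++ [Char.ofNat ((48 + PySem.Int.mod st.1 10).toNat)]))
           (v + w, [])
         String.ofList (if st.1 ≠ 0 then st.2 ++ ['1'] else st.2)) := by
    intro L1 L2 hL1 hL2 hd1 hd2 hv1 hv2
    have hA := loopA L1 L2 (by rw [hL1, hL2]) hd1 hd2 0 (by norm_num) []
    simp only [Nat.cast_zero, Nat.add_zero, List.nil_append] at hA
    simp only []
    rw [hA]
    have hB0 : l1.reverse.foldl (fun a c => 10 * a + (PySem.Int.ofChars? [c]).getD 0) 0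
        + l2.reverse.foldl (fun a c => 10 * a + (PySem.Int.ofChars? [c]).getD 0) 0
        = ((valLE l1 + valLE l2 : Nat) : Int) := by
      rw [hornerB l1 h1, hornerB l2 h2]; push_cast; ring
    rw [hB0, loopB m (valLE l1 + valLE l2) []]
    rw [hL1, hv1, hv2]
    set V := valLE l1 + valLE l2 with hV
    have h10 : 0 < 10 ^ m := pow_pos (by norm_num) m
    rcases Nat.lt_or_ge V (10 ^ m) with hlt | hge
    · have hz : V / 10 ^ m = 0 := Nat.div_eq_of_lt hlt
      rw [hz]
      simp [Nat.not_le.mpr hlt]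
    · have hnz : V / 10 ^ m ≠ 0 := by
        have := (Nat.le_div_iff_mul_le h10).mpr (by omega : 1 * 10 ^ m ≤ V)
        omega
      have hIz : ¬ ((V : Int) / (10 : Int) ^ m = 0) := by
        rw [show ((10 : Int)) ^ m = ((10 ^ m : Nat) : Int) from by push_cast; rfl,
          ← Int.natCast_div]
        exact_mod_cast hnz
      simp [hge, hIz]
  -- plug in the actual padded lists produced by A's padding branch
  simp only []
  set pad : Nat := ((l1.length : Int) - (l2.length : Int)).natAbs with hpad
  by_cases hp0 : pad = 0
  · have hlen : l1.length = l2.length := by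
      have := hp0; rw [hpad] at this; omega
    rw [if_pos hp0]
    exact key l1 l2 (by omega) (by omega) h1 h2 rfl rfl
  · rw [if_neg hp0]
    by_cases hgt : l2.length < l1.length
    · rw [if_pos hgt]
      have hpadv : pad = l1.length - l2.length := by rw [hpad]; omega
      exact key l1 (l2 ++ List.replicate pad '0')
        (by omega)
        (by simp [hpadv]; omega)
        h1
        (by intro c hc
            rcases List.mem_append.mp hc with h | h
            · exact h2 c h
            · rw [List.eq_of_mem_replicate h]; decide)
        rfl (valLE_append_zeros l2 pad)
    · rw [if_neg hgt]
      have hpadv : pad = l2.length - l1.length := by rw [hpad]; omega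
      exact key (l1 ++ List.replicate pad '0') l2
        (by simp [hpadv]; omega)
        (by omega)
        (by intro c hc
            rcases List.mem_append.mp hc with h | h
            · exact h1 c h
            · rw [List.eq_of_mem_replicate h]; decide)
        h2
        (valLE_append_zeros l1 pad) rfl
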